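-- pv_equiv track=rewrite | github.com/LuisAlbertoFP/zigbee2mqtt | mqtt-admin/app.py | clean_config_lines
-- ===== SOURCE A (Python) =====
-- def clean_config_lines(lines):
--     """
--     Elimina:
--     - listeners websocket (9001)
--     - protocol websockets
--     - duplicados
--     """
--     cleaned = []
--     skip_ws_block = False
--
--     for line in lines:
--         stripped = line.strip()
--
--         # eliminar bloque websocket completo
--         if stripped.startswith("listener 9001"):
--             skip_ws_block = True
--             continue
--
--         if skip_ws_block:
--             if stripped.startswith("listener"):
--                 skip_ws_block = False
--             else:
--                 continue
--
--         # eliminar cualquier rastro de websocket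
--         if "protocol websockets" in stripped:
--             continue
--
--         cleaned.append(line)
--
--     return cleaned
-- ===== SOURCE B (Python) =====
-- def clean_config_lines(lines):
--     """Index-based single pass: a 'listener 9001' line starts a run that is
--     consumed by an inner loop up to (not including) the next 'listener' line,
--     instead of carrying a skip flag across iterations."""
--     cleaned = []
--     i = 0
--     n = len(lines)
--     while i < n:
--         stripped = lines[i].strip()
--         if stripped.startswith("listener 9001"):
--             i += 1
--             while i < n and not lines[i].strip().startswith("listener"):
--                 i += 1
--             continue
--         if "protocol websockets" not in stripped:
--             cleaned.append(lines[i])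
--         i += 1
--     return cleaned
-- ===== Notes on version B (the rewrite author's own statement) =====
-- stated objective: alternative
-- what changed: Replaces A's skip_ws_block boolean flag carried across a for-loop by an index-based while loop that consumes each websocket run with an inner loop up to the next 'listener' line, keeping run boundaries in the loop position instead of flag state.
import Mathlib
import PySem

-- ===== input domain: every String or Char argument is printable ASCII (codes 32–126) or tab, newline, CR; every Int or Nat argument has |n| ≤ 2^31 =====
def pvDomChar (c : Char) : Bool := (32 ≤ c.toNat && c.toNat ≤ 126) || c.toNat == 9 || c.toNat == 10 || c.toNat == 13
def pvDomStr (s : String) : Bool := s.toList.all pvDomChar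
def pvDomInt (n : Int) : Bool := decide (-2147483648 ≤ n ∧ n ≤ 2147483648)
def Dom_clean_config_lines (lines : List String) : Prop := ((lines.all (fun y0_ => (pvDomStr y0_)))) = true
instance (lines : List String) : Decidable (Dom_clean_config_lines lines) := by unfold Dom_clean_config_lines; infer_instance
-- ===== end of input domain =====

-- B replaces A's skip_ws_block boolean flag by an index-based pass that consumes
-- a websocket run with an inner loop (objective: simpler decomposition, same cost).

-- ===== PORT A =====
-- one loop step of A: state = (cleaned, skip_ws_block)
def pvStepA (st : List String × Bool) (line : String) : List String × Bool :=
  let stripped := PySem.Str.strip line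
  if PySem.Str.startswith stripped "listener 9001" then (st.1, true)
  else if st.2 && !(PySem.Str.startswith stripped "listener") then (st.1, true)
  else if PySem.Str.isIn "protocol websockets" stripped then (st.1, false)
  else (st.1 ++ [line], false)

def clean_config_lines (lines : List String) : List String :=
  (lines.foldl pvStepA ([], false)).1

-- ===== PORT B =====
-- the inner `while i < n and not lines[i].strip().startswith("listener")` consumes this prefix
def pvNotListener (l : String) : Bool :=
  !(PySem.Str.startswith (PySem.Str.strip l) "listener")

def pvGoB : List String → List String
  | [] => []
  | l :: rest =>
    let stripped := PySem.Str.strip l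
    if PySem.Str.startswith stripped "listener 9001" then
      pvGoB (rest.dropWhile pvNotListener)
    else if PySem.Str.isIn "protocol websockets" stripped then pvGoB rest
    else l :: pvGoB rest
termination_by xs => xs.length
decreasing_by
  · exact Nat.lt_succ_of_le (List.length_dropWhile_le _ _)
  · simp
  · simp

def clean_config_lines_alt (lines : List String) : List String := pvGoB lines

-- ===== PRECONDITION & SPEC =====
def Spec_clean_config_lines (lines : List String) (out : List String) : Prop := out = clean_config_lines_alt lines
instance (lines : List String) (out : List String) : Decidable (Spec_clean_config_lines lines out) := by unfold Spec_clean_config_lines; infer_instance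

-- ===== CLAIM (what is proved, stated in full; the proofs are below) =====
def Claim_equal_clean_config_lines : Prop := ∀ (lines : List String), Dom_clean_config_lines lines → Spec_clean_config_lines lines (clean_config_lines lines)

-- ===== LEMMAS AND PROOFS =====

lemma pvGoB_nil : pvGoB [] = [] := by rw [pvGoB]

lemma pvGoB_cons (l : String) (rest : List String) :
    pvGoB (l :: rest) =
      (if PySem.Str.startswith (PySem.Str.strip l) "listener 9001" then
        pvGoB (rest.dropWhile pvNotListener)
      else if PySem.Str.isIn "protocol websockets" (PySem.Str.strip l) then pvGoB rest
      else l :: pvGoB rest) := by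
  rw [pvGoB]

-- "listener 9001" starts with "listener": a prefix of the prefix
lemma pv_starts_mono (cs : List Char)
    (h : PySem.Chars.startswith cs ['l', 'i', 's', 't', 'e', 'n', 'e', 'r', ' ', '9', '0', '0', '1'] = true) :
    PySem.Chars.startswith cs ['l', 'i', 's', 't', 'e', 'n', 'e', 'r'] = true := by
  rw [PySem.Chars.startswith_iff] at h ⊢
  exact List.IsPrefix.trans (by decide) h

-- A with the flag set behaves like A with the flag clear on the run's remainder
lemma pv_skip_eq (xs : List String) (acc : List String) :
    (xs.foldl pvStepA (acc, true)).1 = ((xs.dropWhile pvNotListener).foldl pvStepA (acc, false)).1 := by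
  induction xs generalizing acc with
  | nil => simp
  | cons l rest ih =>
    by_cases hnl : pvNotListener l = true
    · have hl : PySem.Chars.startswith (PySem.Chars.strip l.toList) ['l', 'i', 's', 't', 'e', 'n', 'e', 'r'] = false := by
        simpa [pvNotListener] using hnl
      have h9 : PySem.Chars.startswith (PySem.Chars.strip l.toList) ['l', 'i', 's', 't', 'e', 'n', 'e', 'r', ' ', '9', '0', '0', '1'] = false := by
        by_contra hc
        simp only [Bool.not_eq_false] at hc
        rw [pv_starts_mono _ hc] at hl
        exact Bool.true_eq_false.mp hl
      have hstep : pvStepA (acc, true) l = (acc, true) := by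
        simp only [pvStepA]; simp [h9, hl]
      rw [List.dropWhile_cons, if_pos hnl, List.foldl_cons, hstep]
      exact ih acc
    · simp only [Bool.not_eq_true] at hnl
      have hl : PySem.Chars.startswith (PySem.Chars.strip l.toList) ['l', 'i', 's', 't', 'e', 'n', 'e', 'r'] = true := by
        simpa [pvNotListener] using hnl
      have hstep : pvStepA (acc, true) l = pvStepA (acc, false) l := by
        simp only [pvStepA]; simp [hl]
      rw [List.dropWhile_cons, if_neg (by simp [hnl]), List.foldl_cons, List.foldl_cons, hstep]

lemma pv_main : ∀ (n : ℕ) (xs : List String), xs.length ≤ n → ∀ acc,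
    (xs.foldl pvStepA (acc, false)).1 = acc ++ pvGoB xs := by
  intro n
  induction n with
  | zero =>
    intro xs hx acc
    have : xs = [] := List.length_eq_zero_iff.mp (Nat.le_zero.mp hx)
    subst this; simp [pvGoB_nil]
  | succ n ih =>
    intro xs hx acc
    match xs with
    | [] => simp [pvGoB_nil]
    | l :: rest =>
      have hr : rest.length ≤ n := Nat.lt_succ_iff.mp hx
      rw [List.foldl_cons, pvGoB_cons]
      by_cases h9 : PySem.Chars.startswith (PySem.Chars.strip l.toList) ['l', 'i', 's', 't', 'e', 'n', 'e', 'r', ' ', '9', '0', '0', '1'] = true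
      · have hstep : pvStepA (acc, false) l = (acc, true) := by
          simp only [pvStepA]; simp [h9]
        rw [hstep, pv_skip_eq, ih _ (le_trans (List.length_dropWhile_le _ _) hr)]
        simp [h9]
      · simp only [Bool.not_eq_true] at h9
        by_cases hp : PySem.Chars.isIn ['p', 'r', 'o', 't', 'o', 'c', 'o', 'l', ' ', 'w', 'e', 'b', 's', 'o', 'c', 'k', 'e', 't', 's'] (PySem.Chars.strip l.toList) = true
        · have hstep : pvStepA (acc, false) l = (acc, false) := by
            simp only [pvStepA]; simp [h9, hp]
          rw [hstep, ih _ hr]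
          simp [h9, hp]
        · simp only [Bool.not_eq_true] at hp
          have hstep : pvStepA (acc, false) l = (acc ++ [l], false) := by
            simp only [pvStepA]; simp [h9, hp]
          rw [hstep, ih _ hr]
          simp [h9, hp]

-- ===== VERDICT (by name: the statement is the Claim_ definition above) =====
theorem clean_config_lines_spec : Claim_equal_clean_config_lines := by
  intro lines _
  unfold Spec_clean_config_lines clean_config_lines clean_config_lines_alt
  simpa using pv_main lines.length lines le_rfl []
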